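-- pv_equiv track=rewrite | github.com/hyeinisfree/kings-algorithm-study | seungmi/week1/모의고사.py | solution
-- ===== SOURCE A (Python) =====
-- def solution(answers):
--     answer=[]
--     counts= [0,0,0]
--     s1=[1,2,3,4,5]
--     s2=[2,1,2,3,2,4,2,5]
--     s3=[3,3,1,1,2,2,4,4,5,5]
--     count=0
--     for a in answers:
--         if a==s1[count%5]:
--             counts[0]+=1
--         if a==s2[count%8]:
--             counts[1]+=1
--         if a==s3[count%10]:
--             counts[2]+=1
--         count+=1
--     student=1
--     for c in counts:
--         if c==max(counts):
--             answer.append(student)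
--         student+=1
--     return answer
-- ===== SOURCE B (Python) =====
-- def score(pat, xs):
--     # consume xs one pattern-period at a time: slice off a block of len(pat)
--     # answers and zip it against the pattern -- no per-element index, no modulo
--     L = len(pat)
--     total = 0
--     i = 0
--     while i < len(xs):
--         for a, p in zip(xs[i:i + L], pat):
--             if a == p:
--                 total += 1
--         i += L
--     return total
--
--
-- def solution(answers):
--     patterns = ([1, 2, 3, 4, 5],
--                 [2, 1, 2, 3, 2, 4, 2, 5],
--                 [3, 3, 1, 1, 2, 2, 4, 4, 5, 5])
--     counts = [score(pat, answers) for pat in patterns]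
--     best = max(counts)
--     return [s for s, c in zip((1, 2, 3), counts) if c == best]
-- ===== Notes on version B (the rewrite author's own statement) =====
-- stated objective: alternative
-- what changed: B scores each pattern by consuming the answers one pattern-period at a time (slice a block of len(pat), zip it against the pattern) instead of A's single fused loop that walks every element with a running counter and three modular lookups; the selection step zips student numbers with the counts instead of a mutable student counter.
import Mathlib
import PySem

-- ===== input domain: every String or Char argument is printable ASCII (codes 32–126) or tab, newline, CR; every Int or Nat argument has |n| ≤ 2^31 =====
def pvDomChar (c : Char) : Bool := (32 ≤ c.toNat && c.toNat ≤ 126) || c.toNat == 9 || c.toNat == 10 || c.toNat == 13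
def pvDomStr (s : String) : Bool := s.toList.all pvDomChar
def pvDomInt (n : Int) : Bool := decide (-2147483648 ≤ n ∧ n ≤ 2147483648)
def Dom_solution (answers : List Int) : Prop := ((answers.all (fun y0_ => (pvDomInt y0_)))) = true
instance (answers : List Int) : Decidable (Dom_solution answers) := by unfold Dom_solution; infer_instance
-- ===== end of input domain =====

-- B scores each pattern by consuming the answers one pattern-period at a time
-- (slice a block, zip it against the pattern) instead of A's fused per-element
-- loop with three modular lookups; same O(n) cost, objective: alternative.

-- ===== PORT A =====
-- A's interleaved loop: one pass over answers with a running index 'count'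
-- updating the three counters together.
def solLoopA : List Int → Int → Int × Int × Int → Int × Int × Int
  | [], _, cs => cs
  | a :: rest, count, (c1, c2, c3) =>
    solLoopA rest (count + 1)
      ((if a == PySem.List.pyGetD [1,2,3,4,5] (PySem.Int.mod count 5) 0 then c1 + 1 else c1),
       (if a == PySem.List.pyGetD [2,1,2,3,2,4,2,5] (PySem.Int.mod count 8) 0 then c2 + 1 else c2),
       (if a == PySem.List.pyGetD [3,3,1,1,2,2,4,4,5,5] (PySem.Int.mod count 10) 0 then c3 + 1 else c3))

-- A's second loop: append student number when its count equals max(counts).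
def solAppendA : List Int → Int → Int → List Int
  | [], _, _ => []
  | c :: rest, student, m =>
    (if c == m then [student] else []) ++ solAppendA rest (student + 1) m

def solution (answers : List Int) : List Int :=
  let cs := solLoopA answers 0 (0, 0, 0)
  let counts : List Int := [cs.1, cs.2.1, cs.2.2]
  solAppendA counts 1 ((PySem.List.max? counts (fun y => y)).getD 0)

-- ===== PORT B =====
-- Source B's inner 'for a, p in zip(...)' accumulation
def zipScore : List Int → List Int → Int
  | a :: xs, p :: ps => (if a == p then 1 else 0) + zipScore xs ps
  | _, _ => 0

-- Source B's while loop: slice one period xs[i:i+L], zip it, advance i by L.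
-- (hL is only a termination hypothesis; every call site has a literal pattern)
def scoreLoop (pat : List Int) (hL : pat ≠ []) (xs : List Int) (i : Nat) : Int :=
  if _h : i < xs.length then
    zipScore (PySem.List.slice xs (some (i : Int)) (some ((i : Int) + (pat.length : Int)))) pat
      + scoreLoop pat hL xs (i + pat.length)
  else 0
termination_by xs.length - i
decreasing_by
  have : pat.length ≠ 0 := by simpa using hL
  omega

def score (pat : List Int) (hL : pat ≠ []) (xs : List Int) : Int := scoreLoop pat hL xs 0

def solution_alt (answers : List Int) : List Int :=
  let counts : List Int :=
    [score [1,2,3,4,5] (by decide) answers,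
     score [2,1,2,3,2,4,2,5] (by decide) answers,
     score [3,3,1,1,2,2,4,4,5,5] (by decide) answers]
  let best := (PySem.List.max? counts (fun y => y)).getD 0
  (List.zip ([1,2,3] : List Int) counts).filterMap
    (fun p => if p.2 == best then some p.1 else none)

-- ===== PRECONDITION & SPEC =====
def Spec_solution (answers : List Int) (out : List Int) : Prop := out = solution_alt answers
instance (answers : List Int) (out : List Int) : Decidable (Spec_solution answers out) := by unfold Spec_solution; infer_instance

-- ===== CLAIM (what is proved, stated in full; the proofs are below) =====
def Claim_equal_solution : Prop := ∀ (answers : List Int), Dom_solution answers → Spec_solution answers (solution answers)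

-- ===== LEMMAS AND PROOFS =====

-- per-pattern version of A's counting, used only in the proofs
def idxScore (pat : List Int) : List Int → Int → Int
  | [], _ => 0
  | a :: rest, k =>
    (if a == PySem.List.pyGetD pat (PySem.Int.mod k (pat.length : Int)) 0 then 1 else 0)
      + idxScore pat rest (k + 1)

theorem solLoopA_eq (l : List Int) : ∀ (k c1 c2 c3 : Int),
    solLoopA l k (c1, c2, c3) =
      (c1 + idxScore [1,2,3,4,5] l k,
       c2 + idxScore [2,1,2,3,2,4,2,5] l k,
       c3 + idxScore [3,3,1,1,2,2,4,4,5,5] l k) := by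
  induction l with
  | nil => intro k c1 c2 c3; simp [solLoopA, idxScore]
  | cons a rest ih =>
    intro k c1 c2 c3
    simp only [solLoopA, ih, idxScore, List.length_cons, List.length_nil]
    norm_num
    split_ifs <;> simp_all <;> ring_nf <;> simp

theorem idxScore_shift (pat : List Int) (l : List Int) : ∀ (k : Int),
    idxScore pat l (k + (pat.length : Int)) = idxScore pat l k := by
  induction l with
  | nil => intro k; simp [idxScore]
  | cons a rest ih =>
    intro k
    have hmod : PySem.Int.mod (k + (pat.length : Int)) (pat.length : Int)
        = PySem.Int.mod k (pat.length : Int) := by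
      simp [PySem.Int.mod, Int.add_fmod_right]
    have : k + (pat.length : Int) + 1 = (k + 1) + (pat.length : Int) := by ring
    simp only [idxScore, hmod, this, ih]

theorem idxScore_append (pat : List Int) (ys zs : List Int) : ∀ (k : Int),
    idxScore pat (ys ++ zs) k = idxScore pat ys k + idxScore pat zs (k + (ys.length : Int)) := by
  induction ys with
  | nil => intro k; simp [idxScore]
  | cons a rest ih =>
    intro k
    simp only [List.cons_append, idxScore, ih, List.length_cons]
    push_cast
    ring

theorem idxScore_prefix (pat : List Int) (ys : List Int) : ∀ (j : Nat),
    j + ys.length ≤ pat.length → idxScore pat ys (j : Int) = zipScore ys (pat.drop j) := by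
  induction ys with
  | nil => intro j _; simp [idxScore, zipScore]
  | cons a rest ih =>
    intro j hj
    have hjlt : j < pat.length := by simp at hj; omega
    have hmod : PySem.Int.mod (j : Int) (pat.length : Int) = (j : Int) := by
      have hb : (0 : Int) ≤ (pat.length : Int) := by positivity
      have h2 : (j : Int) % (pat.length : Int) = (j : Int) :=
        Int.emod_eq_of_lt (by positivity) (by exact_mod_cast hjlt)
      simp [PySem.Int.mod, Int.fmod_eq_emod, hb, h2]
    have hdrop : pat.drop j = pat[j] :: pat.drop (j + 1) := List.drop_eq_getElem_cons hjlt
    have hget : PySem.List.pyGetD pat (j : Int) 0 = pat[j] := by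
      rw [PySem.List.pyGetD_natCast]
      exact List.getD_eq_getElem pat 0 hjlt
    have hstep : ((j : Int) + 1) = ((j + 1 : Nat) : Int) := by push_cast; ring
    simp only [idxScore, hmod, hget, hdrop, zipScore, hstep]
    rw [ih (j + 1) (by simp at hj ⊢; omega)]

theorem scoreLoop_eq_idx (pat : List Int) (hL : pat ≠ []) (xs : List Int) : ∀ (i : Nat),
    scoreLoop pat hL xs i = idxScore pat (xs.drop i) 0 := by
  have hLpos : 0 < pat.length := List.length_pos_iff.mpr hL
  intro i
  generalize hmeas : xs.length - i = n
  induction n using Nat.strong_induction_on generalizing i with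
  | _ n ihn =>
    rw [scoreLoop]
    by_cases h : i < xs.length
    · simp only [h, dif_pos]
      have hslice : PySem.List.slice xs (some (i : Int)) (some ((i : Int) + (pat.length : Int)))
          = (xs.drop i).take pat.length := PySem.List.slice_natCast_add xs i pat.length
      set ys := xs.drop i with hys
      have hys_len : ys.length = xs.length - i := by simp [hys]
      have hsplit : idxScore pat ys 0
          = idxScore pat (ys.take pat.length) 0
            + idxScore pat (ys.drop pat.length) ((ys.take pat.length).length : Int) := by
        conv_lhs => rw [← List.take_append_drop pat.length ys]
        rw [idxScore_append]
        norm_num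
      have hpre : idxScore pat (ys.take pat.length) 0 = zipScore (ys.take pat.length) pat := by
        have := idxScore_prefix pat (ys.take pat.length) 0 (by simp)
        simpa using this
      have hrec : scoreLoop pat hL xs (i + pat.length) = idxScore pat (xs.drop (i + pat.length)) 0 := by
        apply ihn (xs.length - (i + pat.length)) (by omega) _ rfl
      have hdd : xs.drop (i + pat.length) = ys.drop pat.length := by
        simp [hys, List.drop_drop]
      have htail : idxScore pat (ys.drop pat.length) ((ys.take pat.length).length : Int)
          = idxScore pat (ys.drop pat.length) 0 := by
        by_cases hlen : pat.length ≤ ys.length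
        · have : (ys.take pat.length).length = pat.length := by simp [hlen]
          rw [this]
          have := idxScore_shift pat (ys.drop pat.length) 0
          simpa using this
        · have : ys.drop pat.length = [] := by
            apply List.drop_eq_nil_of_le; omega
          simp [this, idxScore]
      rw [hslice, hsplit, hpre, hrec, hdd, htail]
    · simp only [h, dif_neg, not_false_iff]
      have : xs.drop i = [] := List.drop_eq_nil_of_le (by omega)
      simp [this, idxScore]

-- A's append loop over the three counts equals B's filterMap over the zip.
theorem solAppendA_eq (c1 c2 c3 m : Int) :
    solAppendA [c1, c2, c3] 1 m =
      (List.zip ([1,2,3] : List Int) [c1, c2, c3]).filterMap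
        (fun p => if p.2 == m then some p.1 else none) := by
  simp only [solAppendA, List.zip, List.zipWith, List.filterMap]
  norm_num
  split_ifs <;> simp

-- ===== VERDICT (by name: the statement is the Claim_ definition above) =====
theorem solution_spec : Claim_equal_solution := by
  intro answers _
  unfold Spec_solution solution solution_alt score
  rw [scoreLoop_eq_idx, scoreLoop_eq_idx, scoreLoop_eq_idx]
  simp only [solLoopA_eq, List.drop_zero]
  norm_num [solAppendA_eq]
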